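-- pv_equiv track=rewrite | github.com/Yongqi099/EvaDB-Youtube-Analysis | youtube_analysis.py | partition_transcript
-- ===== SOURCE A (Python) =====
-- MAX_CHUNK_SIZE = 1000
--
-- def partition_transcript(raw_transcript: str):
--     """Group video transcript elements when they are too large.
--
--     Args:
--         raw_transcript (str): downloaded video transcript as a raw string.
--
--     Returns:
--         List: a list of partitioned transcript
--     """
--     if len(raw_transcript) <= MAX_CHUNK_SIZE:
--         return [{"text": raw_transcript}]
--
--     k = 2
--     while True:
--         if (len(raw_transcript) / k) <= MAX_CHUNK_SIZE:
--             break
--         else: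
--             k += 1
--
--     chunk_size = int(len(raw_transcript) / k)
--
--     partitioned_transcript = [
--         {"text": raw_transcript[i: i + chunk_size]}
--         for i in range(0, len(raw_transcript), chunk_size)
--     ]
--     if len(partitioned_transcript[-1]["text"]) < 30:
--         partitioned_transcript.pop()
--     return partitioned_transcript
-- ===== SOURCE B (Python) =====
-- MAX_CHUNK_SIZE = 1000
--
-- def partition_transcript(raw_transcript: str):
--     """Group video transcript elements when they are too large."""
--     n = len(raw_transcript)
--     if n <= MAX_CHUNK_SIZE:
--         return [{"text": raw_transcript}]
--
--     # closed-form ceiling division instead of the incremental search for k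
--     k = (n + MAX_CHUNK_SIZE - 1) // MAX_CHUNK_SIZE
--     chunk_size = n // k
--
--     # consume the string front-to-back instead of indexing with range()
--     chunks = []
--     rest = raw_transcript
--     while rest:
--         chunks.append({"text": rest[:chunk_size]})
--         rest = rest[chunk_size:]
--     if len(chunks[-1]["text"]) < 30:
--         chunks.pop()
--     return chunks
-- ===== Notes on version B (the rewrite author's own statement) =====
-- stated objective: simpler
-- what changed: The incremental while-loop search for the smallest k with len/k <= 1000 is replaced by a closed-form ceiling division, and the range()-indexed slicing comprehension by a loop that consumes the string front-to-back.
import Mathlib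
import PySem

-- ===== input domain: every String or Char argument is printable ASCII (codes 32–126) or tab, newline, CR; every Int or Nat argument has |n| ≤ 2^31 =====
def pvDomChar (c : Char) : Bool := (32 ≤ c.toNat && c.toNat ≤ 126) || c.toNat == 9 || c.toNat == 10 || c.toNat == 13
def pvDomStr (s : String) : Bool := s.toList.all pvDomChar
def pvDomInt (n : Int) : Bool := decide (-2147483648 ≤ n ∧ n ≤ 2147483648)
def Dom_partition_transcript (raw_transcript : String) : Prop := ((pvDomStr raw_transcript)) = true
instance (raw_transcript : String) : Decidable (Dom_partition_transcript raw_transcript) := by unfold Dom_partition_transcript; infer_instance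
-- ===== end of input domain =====

-- B replaces A's incremental search for k by a closed-form ceiling division and the
-- range()-indexed slicing comprehension by a loop consuming the string front-to-back (objective: simpler).

-- ===== PORT A =====
-- 'k = 2; while True: if len/k <= 1000: break else k += 1'; the float comparison
-- len/k <= 1000 is ported as the exact integer comparison len <= 1000*k (exact at these magnitudes).
def pvFindK (n k : Int) : Int :=
  if n ≤ 1000 * k then k else pvFindK n (k + 1)
termination_by (n - 1000 * k).toNat
decreasing_by omega

def partition_transcript (raw_transcript : String) : List (List (String × String)) :=
  let n := PySem.Str.len raw_transcript
  if n ≤ 1000 then [[("text", raw_transcript)]]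
  else
    let k := pvFindK n 2
    -- int(len/k): float truncation = floor division here (both operands positive, exact at these magnitudes)
    let c := PySem.Int.floordiv n k
    let parts := (PySem.List.pyRange 0 n c).map
      (fun i => [("text", PySem.Str.slice raw_transcript (some i) (some (i + c)))])
    match parts.getLast? with
    | none => parts  -- unreachable: parts is nonempty since n > 1000
    | some last =>
      -- last["text"]: first-match lookup in the association list (the key is always present)
      if PySem.Str.len ((List.lookup "text" last).getD "") < 30 then parts.dropLast else parts

-- ===== PORT B =====
-- 'while rest: chunks.append({"text": rest[:c]}); rest = rest[c:]' over the code points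
def pvChunks (c : Nat) (rest : List Char) : List (List (String × String)) :=
  if rest.isEmpty || c == 0 then []  -- 'c == 0' is a totality guard only; every call has c ≥ 1
  else [("text", String.ofList (rest.take c))] :: pvChunks c (rest.drop c)
termination_by rest.length
decreasing_by
  rename_i h
  simp only [Bool.or_eq_true, List.isEmpty_iff, beq_iff_eq] at h
  simp only [not_or] at h
  have := List.length_pos_iff.mpr h.1
  simp only [List.length_drop]
  omega

def partition_transcript_alt (raw_transcript : String) : List (List (String × String)) :=
  let n := PySem.Str.len raw_transcript
  if n ≤ 1000 then [[("text", raw_transcript)]]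
  else
    let k := PySem.Int.floordiv (n + 1000 - 1) 1000
    let c := PySem.Int.floordiv n k
    -- c ≥ 1 always holds here; .toNat is a safe conversion of a positive count
    let chunks := pvChunks c.toNat raw_transcript.toList
    match chunks.getLast? with
    | none => chunks
    | some last =>
      if PySem.Str.len ((List.lookup "text" last).getD "") < 30 then chunks.dropLast else chunks

-- ===== PRECONDITION & SPEC =====
def Spec_partition_transcript (raw_transcript : String) (out : List (List (String × String))) : Prop := out = partition_transcript_alt raw_transcript
instance (raw_transcript : String) (out : List (List (String × String))) : Decidable (Spec_partition_transcript raw_transcript out) := by unfold Spec_partition_transcript; infer_instance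

-- ===== CLAIM (what is proved, stated in full; the proofs are below) =====
def Claim_equal_partition_transcript : Prop := ∀ (raw_transcript : String), Dom_partition_transcript raw_transcript → Spec_partition_transcript raw_transcript (partition_transcript raw_transcript)

-- ===== LEMMAS AND PROOFS =====

-- A's search loop computes the ceiling division (n + 999) / 1000 once 1000*(k-1) < n
theorem pvFindK_eq (n k : Int) (h1 : 0 < k) (h2 : 1000 * (k - 1) < n) :
    pvFindK n k = (n + 999) / 1000 := by
  unfold pvFindK
  split
  · omega
  · exact pvFindK_eq n (k + 1) (by omega) (by omega)
termination_by (n - 1000 * k).toNat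
decreasing_by omega

theorem pyRange_pos_cons (a b c : Int) (hc : 0 < c) (hab : a < b) :
    PySem.List.pyRange a b c = a :: PySem.List.pyRange (a + c) b c := by
  rw [PySem.List.pyRange_of_pos _ _ hc, PySem.List.pyRange_of_pos _ _ hc]
  have hy : (0:Int) ≤ b - a - 1 := by omega
  have hsum : b - a + c - 1 = (b - a - 1) + 1 * c := by ring
  have hdiv : (b - a + c - 1) / c = (b - a - 1) / c + 1 := by
    rw [hsum, Int.add_mul_ediv_right _ _ (by omega)]
  have hnn : (0:Int) ≤ (b - a - 1) / c := Int.ediv_nonneg hy (by omega)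
  have hcount : (if a < b then ((b - a + c - 1) / c).toNat else 0)
      = (if a + c < b then ((b - (a + c) + c - 1) / c).toNat else 0) + 1 := by
    rw [if_pos hab]
    split_ifs with h
    · have heq : b - (a + c) + c - 1 = b - a - 1 := by ring
      rw [heq, hdiv]; omega
    · have hlt : b - a - 1 < c := by omega
      have hz : (b - a - 1) / c = 0 := Int.ediv_eq_zero_of_lt hy hlt
      rw [hdiv, hz]; omega
  rw [hcount, List.range_succ_eq_map, List.map_cons, List.map_map]
  congr 1
  · simp
  · apply List.map_congr_left
    intro x _
    simp only [Function.comp_apply]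
    push_cast
    ring

-- the comprehension over range(j, n, c) with absolute slices equals consuming l.drop j
theorem chunks_go (c : Nat) (hc : 0 < c) (l : List Char) (j : Nat) :
    (PySem.List.pyRange (j : Int) (l.length : Int) (c : Int)).map
        (fun i => ([("text", String.ofList (PySem.List.slice l (some i) (some (i + (c : Int)))))] : List (String × String)))
      = pvChunks c (l.drop j) := by
  by_cases hj : l.length ≤ j
  · rw [PySem.List.pyRange_of_pos _ _ (by exact_mod_cast hc)]
    rw [if_neg (by exact_mod_cast not_lt.mpr (Int.ofNat_le.mpr hj))]
    rw [List.drop_eq_nil_of_le hj, pvChunks]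
    simp
  · rw [not_le] at hj
    rw [pyRange_pos_cons _ _ _ (by exact_mod_cast hc) (by exact_mod_cast hj), List.map_cons]
    conv_rhs => rw [pvChunks]
    rw [if_neg (by
      simp only [Bool.or_eq_true, List.isEmpty_iff, beq_iff_eq, not_or]
      refine ⟨fun hnil => ?_, by omega⟩
      have := congrArg List.length hnil
      simp only [List.length_drop, List.length_nil] at this
      omega)]
    have hcast : ((j : Int) + (c : Int)) = (((j + c : Nat)) : Int) := by push_cast; ring
    congr 1
    · rw [PySem.List.slice_natCast_add]
    · rw [hcast, chunks_go c hc l (j + c), List.drop_drop]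
termination_by l.length - j
decreasing_by omega

theorem ofList_toList_slice (s : String) (a? b? : Option Int) :
    PySem.Str.slice s a? b? = String.ofList (PySem.List.slice s.toList a? b?) := by
  have h := PySem.Str.toList_slice s a? b?
  simp only [PySem.Chars.slice_eq_listSlice] at h
  rw [← h, String.ofList_toList]

-- ===== VERDICT (by name: the statement is the Claim_ definition above) =====
theorem partition_transcript_spec : Claim_equal_partition_transcript := by
  intro s _
  unfold Spec_partition_transcript partition_transcript partition_transcript_alt
  simp only [PySem.Str.len_eq]
  by_cases hle : ((s.toList.length : Int) ≤ 1000)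
  · rw [if_pos hle, if_pos hle]
  · rw [if_neg hle, if_neg hle]
    have hk : pvFindK (s.toList.length : Int) 2 = PySem.Int.floordiv ((s.toList.length : Int) + 1000 - 1) 1000 := by
      rw [PySem.Int.floordiv_eq_ediv_of_pos (by omega)]
      rw [pvFindK_eq _ _ (by omega) (by omega)]
      omega
    rw [hk]
    set K := PySem.Int.floordiv ((s.toList.length : Int) + 1000 - 1) 1000 with hK
    have hKpos : 0 < K := by
      rw [hK, PySem.Int.floordiv_eq_ediv_of_pos (by omega)]
      omega
    have hKle : K ≤ (s.toList.length : Int) := by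
      rw [hK, PySem.Int.floordiv_eq_ediv_of_pos (by omega)]
      omega
    set C := PySem.Int.floordiv ((s.toList.length : Int)) K with hC
    have hCpos : 0 < C := by
      rw [hC, PySem.Int.floordiv_eq_ediv_of_pos hKpos]
      exact lt_of_lt_of_le zero_lt_one ((Int.le_ediv_iff_mul_le hKpos).mpr (by omega))
    have hCcast : C = ((C.toNat : Nat) : Int) := by omega
    have hchunks : (PySem.List.pyRange 0 (s.toList.length : Int) C).map
        (fun i => ([("text", PySem.Str.slice s (some i) (some (i + C)))] : List (String × String)))
        = pvChunks C.toNat s.toList := by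
      have h0 := chunks_go C.toNat (by omega) s.toList 0
      simp only [List.drop_zero] at h0
      rw [← h0]
      have : ((0:Nat) : Int) = (0 : Int) := by norm_num
      rw [← this]
      rw [show (((C.toNat : Nat)) : Int) = C by omega]
      apply List.map_congr_left
      intro i _
      rw [ofList_toList_slice]
    rw [hchunks]
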